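-- pv_equiv track=rewrite | github.com/zakiehmn/contactdon | UserInterface.py | params_contact_dict
-- ===== SOURCE A (Python) =====
-- def params_contact_dict(splitCommand):
--     paramsDict = {}
--     fName, lName, emailAddress, phoneNumber = "", "", "", ""
--     for index in range(len(splitCommand)):
--         if(splitCommand[index] == "-f"):
--             fName = splitCommand[index+1]
--         if(splitCommand[index] == "-l"):
--             lName = splitCommand[index+1]
--         if(splitCommand[index] == "-e"):
--             emailAddress = splitCommand[index+1]
--         if(splitCommand[index] == "-p"):
--             phoneNumber = splitCommand[index+1]
--     if(fName != ""):
--         paramsDict["first_name"] = fName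
--     if(lName != ""):
--         paramsDict.update({"last_name" : lName})
--     if(emailAddress != ""):
--         paramsDict.update({"email_address" : emailAddress})
--     if(phoneNumber != ""):
--         paramsDict.update({"phone_number" : phoneNumber})
--     return paramsDict
-- ===== SOURCE B (Python) =====
-- _FIELDS = (("-f", "first_name"), ("-l", "last_name"), ("-e", "email_address"), ("-p", "phone_number"))
--
-- def params_contact_dict(splitCommand):
--     # For each field, search BACKWARD for the last occurrence of its flag and
--     # take the token after it; no per-token state is maintained during a pass.
--     result = {}
--     for flag, field in _FIELDS:
--         for i in range(len(splitCommand) - 1, -1, -1):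
--             if splitCommand[i] == flag:
--                 value = splitCommand[i + 1]
--                 if value != "":
--                     result[field] = value
--                 break
--     return result
-- ===== Notes on version B (the rewrite author's own statement) =====
-- stated objective: alternative
-- what changed: Instead of A's single forward pass maintaining four field variables overwritten on every flag hit, B keeps no per-token state: for each of the four fields it searches backward from the end for the last occurrence of its flag and conditionally inserts the following token.
import Mathlib
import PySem

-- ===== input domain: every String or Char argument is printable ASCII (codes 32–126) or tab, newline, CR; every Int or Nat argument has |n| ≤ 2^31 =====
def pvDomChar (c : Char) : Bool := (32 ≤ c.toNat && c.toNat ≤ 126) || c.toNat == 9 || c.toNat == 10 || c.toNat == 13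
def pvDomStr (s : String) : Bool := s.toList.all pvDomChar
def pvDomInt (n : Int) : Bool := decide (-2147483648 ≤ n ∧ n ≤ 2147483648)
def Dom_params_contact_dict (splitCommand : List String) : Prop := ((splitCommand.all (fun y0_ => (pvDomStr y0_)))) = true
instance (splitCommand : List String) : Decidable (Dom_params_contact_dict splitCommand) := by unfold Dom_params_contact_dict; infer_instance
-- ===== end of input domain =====

-- B replaces A's forward pass with four staged backward searches for each
-- flag's last occurrence (objective: alternative; no per-token state kept).


-- ===== PORT A =====
def params_contact_dict (splitCommand : List String) : List (String × String) :=
  let st :=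
    (PySem.List.pyRange 0 (splitCommand.length : Int) 1).foldl
      (fun (st : String × String × String × String) index =>
        (if PySem.List.pyGetD splitCommand index "" == "-f" then
            PySem.List.pyGetD splitCommand (index + 1) "" else st.1,
         if PySem.List.pyGetD splitCommand index "" == "-l" then
            PySem.List.pyGetD splitCommand (index + 1) "" else st.2.1,
         if PySem.List.pyGetD splitCommand index "" == "-e" then
            PySem.List.pyGetD splitCommand (index + 1) "" else st.2.2.1,
         if PySem.List.pyGetD splitCommand index "" == "-p" then
            PySem.List.pyGetD splitCommand (index + 1) "" else st.2.2.2))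
      ("", "", "", "")
  let paramsDict : PySem.Dict String String := PySem.Dict.empty
  let paramsDict := if st.1 != "" then paramsDict.insert "first_name" st.1 else paramsDict
  let paramsDict := if st.2.1 != "" then paramsDict.insert "last_name" st.2.1 else paramsDict
  let paramsDict := if st.2.2.1 != "" then paramsDict.insert "email_address" st.2.2.1 else paramsDict
  let paramsDict := if st.2.2.2 != "" then paramsDict.insert "phone_number" st.2.2.2 else paramsDict
  paramsDict.items

-- ===== PORT B =====
-- B's inner backward loop with 'break': first index in the countdown whose
-- token equals the flag yields the next token; exhaustion yields none.
def pvScan (xs : List String) (flag : String) : List Int → Option String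
  | [] => none
  | i :: rest =>
    if PySem.List.pyGetD xs i "" == flag then
      some (PySem.List.pyGetD xs (i + 1) "")
    else pvScan xs flag rest

def params_contact_dict_alt (splitCommand : List String) : List (String × String) :=
  let idxs := PySem.List.pyRange ((splitCommand.length : Int) - 1) (-1) (-1)
  (([("-f", "first_name"), ("-l", "last_name"), ("-e", "email_address"), ("-p", "phone_number")] :
      List (String × String)).foldl
    (fun (result : PySem.Dict String String) fp =>
      match pvScan splitCommand fp.1 idxs with
      | some v => if v != "" then result.insert fp.2 v else result
      | none => result)
    PySem.Dict.empty).items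

-- ===== PRECONDITION & SPEC =====
-- Pre_ excludes exactly the inputs where Python A raises IndexError: a flag token
-- ("-f"/"-l"/"-e"/"-p") as the LAST element makes A read splitCommand[index+1] past the end.
def Pre_params_contact_dict (splitCommand : List String) : Prop :=
  ∀ s, splitCommand.getLast? = some s → s ∉ (["-f", "-l", "-e", "-p"] : List String)
instance (splitCommand : List String) : Decidable (Pre_params_contact_dict splitCommand) := by
  unfold Pre_params_contact_dict; infer_instance

def pvWitness_params_contact_dict : List String := ["-f", "Ada", "-e", "ada@x.io"]

def Spec_params_contact_dict (splitCommand : List String) (out : List (String × String)) : Prop := out = params_contact_dict_alt splitCommand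
instance (splitCommand : List String) (out : List (String × String)) : Decidable (Spec_params_contact_dict splitCommand out) := by unfold Spec_params_contact_dict; infer_instance

-- ===== CLAIM (what is proved, stated in full; the proofs are below) =====
def Claim_equal_params_contact_dict : Prop := ∀ (splitCommand : List String), Dom_params_contact_dict splitCommand → Pre_params_contact_dict splitCommand → Spec_params_contact_dict splitCommand (params_contact_dict splitCommand)

-- ===== LEMMAS AND PROOFS =====

-- pvScan distributes over ++: the first half wins if it matches.
theorem pvScan_append (xs : List String) (flag : String) :
    ∀ (L1 L2 : List Int),
      pvScan xs flag (L1 ++ L2)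
        = (pvScan xs flag L1).elim (pvScan xs flag L2) some := by
  intro L1
  induction L1 with
  | nil => intro L2; simp [pvScan]
  | cons i L1 ih =>
    intro L2
    simp only [List.cons_append, pvScan]
    split_ifs with h
    · simp
    · exact ih L2

-- A forward overwrite-fold equals B's backward first-match scan.
theorem pv_fold_last (xs : List String) (flag : String) :
    ∀ (L : List Int) (acc : String),
      L.foldl
          (fun a i =>
            if PySem.List.pyGetD xs i "" == flag then PySem.List.pyGetD xs (i + 1) "" else a)
          acc
        = (pvScan xs flag L.reverse).getD acc := by
  intro L
  induction L with
  | nil => intro acc; simp [pvScan]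
  | cons i L ih =>
    intro acc
    simp only [List.foldl_cons, List.reverse_cons, pvScan_append]
    rw [ih]
    cases pvScan xs flag L.reverse with
    | some v => simp
    | none =>
      simp only [Option.elim, pvScan]
      split_ifs <;> simp

-- A's product-state fold splits into four independent scalar folds.
theorem pv_split (w : Int → String) (c1 c2 c3 c4 : Int → Bool) :
    ∀ (L : List Int) (f l e p : String),
      L.foldl
          (fun (st : String × String × String × String) i =>
            (if c1 i then w i else st.1,
             if c2 i then w i else st.2.1,
             if c3 i then w i else st.2.2.1,
             if c4 i then w i else st.2.2.2))
          (f, l, e, p)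
        = (L.foldl (fun a i => if c1 i then w i else a) f,
           L.foldl (fun a i => if c2 i then w i else a) l,
           L.foldl (fun a i => if c3 i then w i else a) e,
           L.foldl (fun a i => if c4 i then w i else a) p) := by
  intro L
  induction L with
  | nil => intro f l e p; rfl
  | cons i L ih => intro f l e p; simp only [List.foldl_cons]; rw [ih]

-- A match-insert on an Option equals an insert guarded by getD "".
theorem pv_ins (o : Option String) (k : String) (d : PySem.Dict String String) :
    (match o with
      | some v => if v != "" then d.insert k v else d
      | none => d)
      = if o.getD "" != "" then d.insert k (o.getD "") else d := by
  cases o with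
  | none => simp
  | some v => simp

-- ===== VERDICT (by name: the statement is the Claim_ definition above) =====
theorem params_contact_dict_spec : Claim_equal_params_contact_dict := by
  intro xs _ _
  simp only [Spec_params_contact_dict, params_contact_dict, params_contact_dict_alt]
  rw [pv_split (fun i => PySem.List.pyGetD xs (i + 1) "")
      (fun i => PySem.List.pyGetD xs i "" == "-f") (fun i => PySem.List.pyGetD xs i "" == "-l")
      (fun i => PySem.List.pyGetD xs i "" == "-e") (fun i => PySem.List.pyGetD xs i "" == "-p")]
  have hrev : PySem.List.pyRange ((xs.length : Int) - 1) (-1) (-1)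
      = (PySem.List.pyRange 0 (xs.length : Int) 1).reverse := by
    rw [PySem.List.pyRange_neg_one_eq_reverse]
    norm_num
  simp only [List.foldl_cons, List.foldl_nil, hrev]
  rw [pv_fold_last xs "-f", pv_fold_last xs "-l", pv_fold_last xs "-e", pv_fold_last xs "-p"]
  rw [pv_ins, pv_ins, pv_ins, pv_ins]
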